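-- pv_equiv track=rewrite | github.com/GLA-Python/surprise-test-abhiagrwll | expanding.py | expanding
-- ===== SOURCE A (Python) =====
-- def expanding(a):
--     c=len(a)
--     lst=[]
--     for i in range(c-1):
--         d=a[i]-a[i+1]
--         lst.append(abs(d))
--     if lst==sorted(lst):
--         return True
--     else:
--         return False
-- ===== SOURCE B (Python) =====
-- def expanding(a):
--     prev = None
--     for x, y in zip(a, a[1:]):
--         d = abs(x - y)
--         if prev is not None and d < prev:
--             return False
--         prev = d
--     return True
-- ===== Notes on version B (the rewrite author's own statement) =====
-- stated objective: faster
-- what changed: Instead of materialising the list of abs-differences and comparing it with its sorted copy, B streams over adjacent pairs once and returns False at the first difference smaller than its predecessor (early exit, no sort, no extra list).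
import Mathlib
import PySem

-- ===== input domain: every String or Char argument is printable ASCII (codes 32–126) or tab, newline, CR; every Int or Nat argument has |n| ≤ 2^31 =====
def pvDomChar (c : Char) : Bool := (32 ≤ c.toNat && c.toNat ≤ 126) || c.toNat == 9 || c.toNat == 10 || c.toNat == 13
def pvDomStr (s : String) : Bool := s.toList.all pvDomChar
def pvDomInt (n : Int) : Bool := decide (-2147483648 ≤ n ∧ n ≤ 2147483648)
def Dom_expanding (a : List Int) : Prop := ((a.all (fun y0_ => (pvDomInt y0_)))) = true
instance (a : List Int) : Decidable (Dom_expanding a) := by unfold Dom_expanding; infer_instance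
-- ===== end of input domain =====

-- B streams over adjacent pairs checking each abs-difference against the previous one,
-- instead of building the difference list and comparing it with its sorted copy (objective: faster).


-- ===== PORT A =====
def expanding (a : List Int) : Bool :=
  let c : Int := a.length
  let lst : List Int :=
    (PySem.List.pyRange 0 (c - 1) 1).foldl
      (fun acc i => acc ++ [|PySem.List.pyGetD a i 0 - PySem.List.pyGetD a (i + 1) 0|]) []
  if lst = PySem.List.sorted lst (fun x => x) false then true else false

-- ===== PORT B =====
-- loop 'for x, y in zip(a, a[1:])' with the previous difference carried along
def expandingGo (prev : Int) (x : Int) : List Int → Bool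
  | [] => true
  | y :: t =>
    let d := |x - y|
    if d < prev then false else expandingGo d y t

def expanding_alt (a : List Int) : Bool :=
  match a with
  | [] => true
  | [_] => true
  | x :: y :: t => expandingGo (|x - y|) y t

-- ===== PRECONDITION & SPEC =====
def Spec_expanding (a : List Int) (out : Bool) : Prop := out = expanding_alt a
instance (a : List Int) (out : Bool) : Decidable (Spec_expanding a out) := by unfold Spec_expanding; infer_instance

-- ===== CLAIM (what is proved, stated in full; the proofs are below) =====
def Claim_equal_expanding : Prop := ∀ (a : List Int), Dom_expanding a → Spec_expanding a (expanding a)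

-- ===== LEMMAS AND PROOFS =====

-- the list of adjacent absolute differences, recursively
def diffL : Int → List Int → List Int
  | _, [] => []
  | x, y :: t => |x - y| :: diffL y t

lemma diffL_eq (x : Int) (t : List Int) :
    (List.range t.length).map
      (fun j => |(x :: t).getD j 0 - (x :: t).getD (j + 1) 0|) = diffL x t := by
  induction t generalizing x with
  | nil => simp [diffL]
  | cons y t ih =>
    simp only [List.length_cons, List.range_succ_eq_map, List.map_cons, List.map_map]
    refine congrArg₂ _ (by simp) ?_
    rw [← ih y]
    apply List.map_congr_left
    intro j _
    simp [List.getD]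

lemma expandingGo_eq (p x : Int) (t : List Int) :
    expandingGo p x t = decide (List.IsChain (· ≤ ·) (p :: diffL x t)) := by
  induction t generalizing p x with
  | nil => simp [expandingGo, diffL]
  | cons y t ih =>
    simp only [expandingGo, ih]
    show (if |x - y| < p then false
          else decide (List.IsChain (· ≤ ·) (|x - y| :: diffL y t))) = _
    show _ = decide (List.IsChain (· ≤ ·) (p :: |x - y| :: diffL y t))
    by_cases h : |x - y| < p
    · simp only [if_pos h, List.isChain_cons_cons]
      symm
      simp only [decide_eq_false_iff_not, not_and]
      intro hle
      omega
    · simp only [if_neg h, List.isChain_cons_cons]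
      have hle : p ≤ |x - y| := by omega
      simp [hle]

lemma sorted_self_iff_pairwise (L : List Int) :
    (L = PySem.List.sorted L (fun x => x) false) ↔ L.Pairwise (· ≤ ·) := by
  constructor
  · intro h
    have := PySem.List.sorted_pairwise L (fun x => x) (κ := Int)
    rw [← h] at this
    exact this
  · intro h
    exact (PySem.List.sorted_eq_self_of_pairwise L (fun x => x) h).symm

lemma expanding_lst (x : Int) (t : List Int) :
    (PySem.List.pyRange 0 ((((x :: t).length : Int)) - 1) 1).foldl
      (fun acc i => acc ++ [|PySem.List.pyGetD (x :: t) i 0 - PySem.List.pyGetD (x :: t) (i + 1) 0|]) []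
      = diffL x t := by
  rw [PySem.List.foldl_append_singleton_eq_map, PySem.List.pyRange_one]
  rw [← diffL_eq x t]
  simp only [List.length_cons, List.map_map, List.nil_append]
  have hn : (((t.length + 1 : Nat) : Int) - 1 - 0).toNat = t.length := by
    push_cast; omega
  rw [hn]
  apply List.map_congr_left
  intro j _
  show |PySem.List.pyGetD (x :: t) ((0 : Int) + j) 0 - PySem.List.pyGetD (x :: t) ((0 : Int) + j + 1) 0| = _
  have h2 : ((0 : Int) + j + 1) = (((j + 1 : Nat)) : Int) := by push_cast; ring
  rw [h2]
  have h1 : ((0 : Int) + j) = ((j : Nat) : Int) := by ring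
  rw [h1, PySem.List.pyGetD_natCast, PySem.List.pyGetD_natCast]

-- ===== VERDICT (by name: the statement is the Claim_ definition above) =====
theorem expanding_spec : Claim_equal_expanding := by
  intro a _
  unfold Spec_expanding
  match a with
  | [] => rfl
  | [x] => rfl
  | x :: y :: t =>
    simp only [expanding, expanding_alt, expandingGo_eq, expanding_lst x (y :: t)]
    show (if diffL x (y :: t) = _ then true else false)
        = decide (List.IsChain (· ≤ ·) (diffL x (y :: t)))
    by_cases h : diffL x (y :: t)
        = PySem.List.sorted (diffL x (y :: t)) (fun x => x) false
    · rw [if_pos h]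
      symm
      simp only [decide_eq_true_iff]
      exact ((sorted_self_iff_pairwise _).mp h).isChain
    · rw [if_neg h]
      symm
      simp only [decide_eq_false_iff_not]
      intro hc
      exact h ((sorted_self_iff_pairwise _).mpr (List.isChain_iff_pairwise.mp hc))
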